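-- pv_equiv track=rewrite | github.com/DanielValcik/arbo | research_d/download_sports_prices.py | parse_sport_from_tags
-- ===== SOURCE A (Python) =====
-- SPORT_TAGS: dict[str, list[str]] = {
--     "nba": ["nba", "basketball"],
--     "epl": ["epl", "premier-league", "premier league"],
--     "nfl": ["nfl", "football"],
--     "soccer": ["soccer", "mls", "la-liga", "serie-a", "bundesliga", "ligue-1", "champions-league"],
--     "mma": ["mma", "ufc"],
--     "mlb": ["mlb", "baseball"],
--     "nhl": ["nhl", "hockey"],
--     "ncaab": ["ncaab", "ncaa-basketball", "march-madness"],
-- }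
--
-- def parse_sport_from_tags(tags: list[str]) -> str | None:
--     """Extract canonical sport identifier from Gamma API tags.
--
--     Args:
--         tags: List of tag strings from a Gamma event/market.
--
--     Returns:
--         Canonical sport string (e.g., "nba", "epl") or None if no match.
--     """
--     if not tags:
--         return None
--     lower_tags = {t.lower().strip() for t in tags}
--     for sport, sport_tags in SPORT_TAGS.items():
--         for st in sport_tags:
--             if st in lower_tags:
--                 return sport
--     return None
-- ===== SOURCE B (Python) =====
-- SPORT_TAGS: dict[str, list[str]] = {
--     "nba": ["nba", "basketball"],
--     "epl": ["epl", "premier-league", "premier league"],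
--     "nfl": ["nfl", "football"],
--     "soccer": ["soccer", "mls", "la-liga", "serie-a", "bundesliga", "ligue-1", "champions-league"],
--     "mma": ["mma", "ufc"],
--     "mlb": ["mlb", "baseball"],
--     "nhl": ["nhl", "hockey"],
--     "ncaab": ["ncaab", "ncaa-basketball", "march-madness"],
-- }
--
-- # reverse index: tag -> (priority, sport), priority = position of the sport in SPORT_TAGS
-- _TAG_TO_PS = {
--     tag: (prio, sport)
--     for prio, (sport, sport_tags) in enumerate(SPORT_TAGS.items())
--     for tag in sport_tags
-- }
--
-- def parse_sport_from_tags(tags: list[str]) -> str | None: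
--     """Extract canonical sport identifier from Gamma API tags."""
--     if not tags:
--         return None
--     best = None
--     for t in tags:
--         ps = _TAG_TO_PS.get(t.lower().strip())
--         if ps is not None and (best is None or ps[0] < best[0]):
--             best = ps
--     return best[1] if best is not None else None
-- ===== Notes on version B (the rewrite author's own statement) =====
-- stated objective: idiomatic
-- what changed: Replaces A's nested scan of SPORT_TAGS against a set of normalised tags with a precomputed reverse index tag -> (priority, sport) and a single pass over the input keeping the lowest-priority match.
import Mathlib
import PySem

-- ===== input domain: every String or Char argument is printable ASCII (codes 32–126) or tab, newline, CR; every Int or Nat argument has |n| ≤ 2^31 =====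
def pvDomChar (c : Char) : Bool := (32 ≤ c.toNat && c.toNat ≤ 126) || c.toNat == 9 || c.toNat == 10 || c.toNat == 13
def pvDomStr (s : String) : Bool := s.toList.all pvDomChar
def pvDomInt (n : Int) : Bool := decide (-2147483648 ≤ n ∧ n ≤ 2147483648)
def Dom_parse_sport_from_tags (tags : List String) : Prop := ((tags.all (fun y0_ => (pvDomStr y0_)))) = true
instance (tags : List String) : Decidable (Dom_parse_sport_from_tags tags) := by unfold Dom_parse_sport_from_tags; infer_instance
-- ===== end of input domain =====

-- B replaces A's nested scan of SPORT_TAGS with a precomputed reverse index tag -> (priority, sport)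
-- and a single pass over the input tags keeping the lowest-priority match (objective: idiomatic).

-- ===== PORT A =====
def SPORT_TAGS : List (String × List String) :=
  [("nba", ["nba", "basketball"]),
   ("epl", ["epl", "premier-league", "premier league"]),
   ("nfl", ["nfl", "football"]),
   ("soccer", ["soccer", "mls", "la-liga", "serie-a", "bundesliga", "ligue-1", "champions-league"]),
   ("mma", ["mma", "ufc"]),
   ("mlb", ["mlb", "baseball"]),
   ("nhl", ["nhl", "hockey"]),
   ("ncaab", ["ncaab", "ncaa-basketball", "march-madness"])]

def parse_sport_from_tags (tags : List String) : Option String :=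
  if tags = [] then none
  else
    let lower_tags : PySem.Set String :=
      PySem.Set.ofList (tags.map (fun t => PySem.Str.strip (PySem.Str.lower t)))
    -- 'for sport, sport_tags in SPORT_TAGS.items(): for st in sport_tags: if st in lower_tags: return sport'
    SPORT_TAGS.findSome? (fun e =>
      if e.2.any (fun st => lower_tags.contains st) then some e.1 else none)

-- ===== PORT B =====
-- reverse index tag -> (priority, sport); priority = position of the sport in SPORT_TAGS
def TAG_TO_PS : PySem.Dict String (Int × String) :=
  PySem.Dict.ofList
    ((PySem.List.enumerate SPORT_TAGS).flatMap (fun e =>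
      e.2.2.map (fun tag => (tag, (e.1, e.2.1)))))

-- loop body of B: keep the (priority, sport) pair with the smallest priority seen so far
def pvStepB (best : Option (Int × String)) (t : String) : Option (Int × String) :=
  match TAG_TO_PS.get? (PySem.Str.strip (PySem.Str.lower t)) with
  | some ps => match best with
               | none => some ps
               | some b => if ps.1 < b.1 then some ps else some b
  | none => best

def parse_sport_from_tags_alt (tags : List String) : Option String :=
  if tags = [] then none
  else (tags.foldl pvStepB none).map (fun b => b.2)

-- ===== PRECONDITION & SPEC =====
def Spec_parse_sport_from_tags (tags : List String) (out : Option String) : Prop := out = parse_sport_from_tags_alt tags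
instance (tags : List String) (out : Option String) : Decidable (Spec_parse_sport_from_tags tags out) := by unfold Spec_parse_sport_from_tags; infer_instance

-- ===== CLAIM (what is proved, stated in full; the proofs are below) =====
def Claim_equal_parse_sport_from_tags : Prop := ∀ (tags : List String), Dom_parse_sport_from_tags tags → Spec_parse_sport_from_tags tags (parse_sport_from_tags tags)

-- ===== LEMMAS AND PROOFS =====

-- left-biased "keep the smaller priority": pvStepB best t = pvMrg best (lookup of t)
def pvMrg (a b : Option (Int × String)) : Option (Int × String) :=
  match a, b with
  | a, none => a
  | none, some p => some p
  | some a, some p => if p.1 < a.1 then some p else some a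

-- the first (priority, sport) of the fixed table whose flag is set
def pvChain8 (b0 b1 b2 b3 b4 b5 b6 b7 : Bool) : Option (Int × String) :=
  if b0 then some (0, "nba") else if b1 then some (1, "epl")
  else if b2 then some (2, "nfl") else if b3 then some (3, "soccer")
  else if b4 then some (4, "mma") else if b5 then some (5, "mlb")
  else if b6 then some (6, "nhl") else if b7 then some (7, "ncaab") else none

-- does some normalised input tag hit the given tag list?
def pvM (sts : List String) (ts : List String) : Bool :=
  ts.any (fun t => sts.contains (PySem.Str.strip (PySem.Str.lower t)))

def pvChainC (ts : List String) : Option (Int × String) :=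
  pvChain8 (pvM ["nba", "basketball"] ts)
           (pvM ["epl", "premier-league", "premier league"] ts)
           (pvM ["nfl", "football"] ts)
           (pvM ["soccer", "mls", "la-liga", "serie-a", "bundesliga", "ligue-1", "champions-league"] ts)
           (pvM ["mma", "ufc"] ts)
           (pvM ["mlb", "baseball"] ts)
           (pvM ["nhl", "hockey"] ts)
           (pvM ["ncaab", "ncaa-basketball", "march-madness"] ts)

lemma pvStepB_eq (best : Option (Int × String)) (t : String) :
    pvStepB best t = pvMrg best (TAG_TO_PS.get? (PySem.Str.strip (PySem.Str.lower t))) := by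
  cases h : TAG_TO_PS.get? (PySem.Str.strip (PySem.Str.lower t)) <;> cases best <;>
    simp [pvStepB, pvMrg] at h ⊢ <;> simp [h]

lemma pvMrg_none_right (a : Option (Int × String)) : pvMrg a none = a := by
  cases a <;> rfl

lemma pvMrg_none_left (a : Option (Int × String)) : pvMrg none a = a := by
  cases a <;> rfl

lemma pvMrg_assoc (a b c : Option (Int × String)) :
    pvMrg (pvMrg a b) c = pvMrg a (pvMrg b c) := by
  rcases a with _ | pa <;> rcases b with _ | pb <;> rcases c with _ | pc <;>
    (try simp only [pvMrg_none_left, pvMrg_none_right])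
  by_cases h1 : pb.1 < pa.1 <;> by_cases h2 : pc.1 < pb.1 <;>
    simp only [pvMrg, h1, h2, if_true, if_false] <;> split_ifs <;> (try rfl) <;> omega

lemma TAG_TO_PS_items :
    TAG_TO_PS.items =
      [("nba", ((0:Int), "nba")),
       ("basketball", ((0:Int), "nba")),
       ("epl", ((1:Int), "epl")),
       ("premier-league", ((1:Int), "epl")),
       ("premier league", ((1:Int), "epl")),
       ("nfl", ((2:Int), "nfl")),
       ("football", ((2:Int), "nfl")),
       ("soccer", ((3:Int), "soccer")),
       ("mls", ((3:Int), "soccer")),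
       ("la-liga", ((3:Int), "soccer")),
       ("serie-a", ((3:Int), "soccer")),
       ("bundesliga", ((3:Int), "soccer")),
       ("ligue-1", ((3:Int), "soccer")),
       ("champions-league", ((3:Int), "soccer")),
       ("mma", ((4:Int), "mma")),
       ("ufc", ((4:Int), "mma")),
       ("mlb", ((5:Int), "mlb")),
       ("baseball", ((5:Int), "mlb")),
       ("nhl", ((6:Int), "nhl")),
       ("hockey", ((6:Int), "nhl")),
       ("ncaab", ((7:Int), "ncaab")),
       ("ncaa-basketball", ((7:Int), "ncaab")),
       ("march-madness", ((7:Int), "ncaab"))] := by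
  decide

lemma pvStep_chain (x : String) (b0 b1 b2 b3 b4 b5 b6 b7 : Bool) :
    pvMrg (TAG_TO_PS.get? x) (pvChain8 b0 b1 b2 b3 b4 b5 b6 b7) =
      pvChain8 (["nba", "basketball"].contains x || b0)
               (["epl", "premier-league", "premier league"].contains x || b1)
               (["nfl", "football"].contains x || b2)
               (["soccer", "mls", "la-liga", "serie-a", "bundesliga", "ligue-1", "champions-league"].contains x || b3)
               (["mma", "ufc"].contains x || b4)
               (["mlb", "baseball"].contains x || b5)
               (["nhl", "hockey"].contains x || b6)
               (["ncaab", "ncaa-basketball", "march-madness"].contains x || b7) := by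
  have hg : TAG_TO_PS.get? x
      = Option.map (fun p => p.2) (List.find? (fun p => p.1 == x) TAG_TO_PS.items) := rfl
  rw [hg, TAG_TO_PS_items]
  by_cases h1 : x = "nba"
  · subst h1
    show pvMrg (some ((0:Int), "nba")) (pvChain8 b0 b1 b2 b3 b4 b5 b6 b7) = pvChain8 true b1 b2 b3 b4 b5 b6 b7
    cases b0 <;> cases b1 <;> cases b2 <;> cases b3 <;> cases b4 <;> cases b5 <;> cases b6 <;> cases b7 <;> rfl
  by_cases h2 : x = "basketball"
  · subst h2
    show pvMrg (some ((0:Int), "nba")) (pvChain8 b0 b1 b2 b3 b4 b5 b6 b7) = pvChain8 true b1 b2 b3 b4 b5 b6 b7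
    cases b0 <;> cases b1 <;> cases b2 <;> cases b3 <;> cases b4 <;> cases b5 <;> cases b6 <;> cases b7 <;> rfl
  by_cases h3 : x = "epl"
  · subst h3
    show pvMrg (some ((1:Int), "epl")) (pvChain8 b0 b1 b2 b3 b4 b5 b6 b7) = pvChain8 b0 true b2 b3 b4 b5 b6 b7
    cases b0 <;> cases b1 <;> cases b2 <;> cases b3 <;> cases b4 <;> cases b5 <;> cases b6 <;> cases b7 <;> rfl
  by_cases h4 : x = "premier-league"
  · subst h4
    show pvMrg (some ((1:Int), "epl")) (pvChain8 b0 b1 b2 b3 b4 b5 b6 b7) = pvChain8 b0 true b2 b3 b4 b5 b6 b7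
    cases b0 <;> cases b1 <;> cases b2 <;> cases b3 <;> cases b4 <;> cases b5 <;> cases b6 <;> cases b7 <;> rfl
  by_cases h5 : x = "premier league"
  · subst h5
    show pvMrg (some ((1:Int), "epl")) (pvChain8 b0 b1 b2 b3 b4 b5 b6 b7) = pvChain8 b0 true b2 b3 b4 b5 b6 b7
    cases b0 <;> cases b1 <;> cases b2 <;> cases b3 <;> cases b4 <;> cases b5 <;> cases b6 <;> cases b7 <;> rfl
  by_cases h6 : x = "nfl"
  · subst h6
    show pvMrg (some ((2:Int), "nfl")) (pvChain8 b0 b1 b2 b3 b4 b5 b6 b7) = pvChain8 b0 b1 true b3 b4 b5 b6 b7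
    cases b0 <;> cases b1 <;> cases b2 <;> cases b3 <;> cases b4 <;> cases b5 <;> cases b6 <;> cases b7 <;> rfl
  by_cases h7 : x = "football"
  · subst h7
    show pvMrg (some ((2:Int), "nfl")) (pvChain8 b0 b1 b2 b3 b4 b5 b6 b7) = pvChain8 b0 b1 true b3 b4 b5 b6 b7
    cases b0 <;> cases b1 <;> cases b2 <;> cases b3 <;> cases b4 <;> cases b5 <;> cases b6 <;> cases b7 <;> rfl
  by_cases h8 : x = "soccer"
  · subst h8
    show pvMrg (some ((3:Int), "soccer")) (pvChain8 b0 b1 b2 b3 b4 b5 b6 b7) = pvChain8 b0 b1 b2 true b4 b5 b6 b7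
    cases b0 <;> cases b1 <;> cases b2 <;> cases b3 <;> cases b4 <;> cases b5 <;> cases b6 <;> cases b7 <;> rfl
  by_cases h9 : x = "mls"
  · subst h9
    show pvMrg (some ((3:Int), "soccer")) (pvChain8 b0 b1 b2 b3 b4 b5 b6 b7) = pvChain8 b0 b1 b2 true b4 b5 b6 b7
    cases b0 <;> cases b1 <;> cases b2 <;> cases b3 <;> cases b4 <;> cases b5 <;> cases b6 <;> cases b7 <;> rfl
  by_cases h10 : x = "la-liga"
  · subst h10
    show pvMrg (some ((3:Int), "soccer")) (pvChain8 b0 b1 b2 b3 b4 b5 b6 b7) = pvChain8 b0 b1 b2 true b4 b5 b6 b7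
    cases b0 <;> cases b1 <;> cases b2 <;> cases b3 <;> cases b4 <;> cases b5 <;> cases b6 <;> cases b7 <;> rfl
  by_cases h11 : x = "serie-a"
  · subst h11
    show pvMrg (some ((3:Int), "soccer")) (pvChain8 b0 b1 b2 b3 b4 b5 b6 b7) = pvChain8 b0 b1 b2 true b4 b5 b6 b7
    cases b0 <;> cases b1 <;> cases b2 <;> cases b3 <;> cases b4 <;> cases b5 <;> cases b6 <;> cases b7 <;> rfl
  by_cases h12 : x = "bundesliga"
  · subst h12
    show pvMrg (some ((3:Int), "soccer")) (pvChain8 b0 b1 b2 b3 b4 b5 b6 b7) = pvChain8 b0 b1 b2 true b4 b5 b6 b7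
    cases b0 <;> cases b1 <;> cases b2 <;> cases b3 <;> cases b4 <;> cases b5 <;> cases b6 <;> cases b7 <;> rfl
  by_cases h13 : x = "ligue-1"
  · subst h13
    show pvMrg (some ((3:Int), "soccer")) (pvChain8 b0 b1 b2 b3 b4 b5 b6 b7) = pvChain8 b0 b1 b2 true b4 b5 b6 b7
    cases b0 <;> cases b1 <;> cases b2 <;> cases b3 <;> cases b4 <;> cases b5 <;> cases b6 <;> cases b7 <;> rfl
  by_cases h14 : x = "champions-league"
  · subst h14
    show pvMrg (some ((3:Int), "soccer")) (pvChain8 b0 b1 b2 b3 b4 b5 b6 b7) = pvChain8 b0 b1 b2 true b4 b5 b6 b7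
    cases b0 <;> cases b1 <;> cases b2 <;> cases b3 <;> cases b4 <;> cases b5 <;> cases b6 <;> cases b7 <;> rfl
  by_cases h15 : x = "mma"
  · subst h15
    show pvMrg (some ((4:Int), "mma")) (pvChain8 b0 b1 b2 b3 b4 b5 b6 b7) = pvChain8 b0 b1 b2 b3 true b5 b6 b7
    cases b0 <;> cases b1 <;> cases b2 <;> cases b3 <;> cases b4 <;> cases b5 <;> cases b6 <;> cases b7 <;> rfl
  by_cases h16 : x = "ufc"
  · subst h16
    show pvMrg (some ((4:Int), "mma")) (pvChain8 b0 b1 b2 b3 b4 b5 b6 b7) = pvChain8 b0 b1 b2 b3 true b5 b6 b7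
    cases b0 <;> cases b1 <;> cases b2 <;> cases b3 <;> cases b4 <;> cases b5 <;> cases b6 <;> cases b7 <;> rfl
  by_cases h17 : x = "mlb"
  · subst h17
    show pvMrg (some ((5:Int), "mlb")) (pvChain8 b0 b1 b2 b3 b4 b5 b6 b7) = pvChain8 b0 b1 b2 b3 b4 true b6 b7
    cases b0 <;> cases b1 <;> cases b2 <;> cases b3 <;> cases b4 <;> cases b5 <;> cases b6 <;> cases b7 <;> rfl
  by_cases h18 : x = "baseball"
  · subst h18
    show pvMrg (some ((5:Int), "mlb")) (pvChain8 b0 b1 b2 b3 b4 b5 b6 b7) = pvChain8 b0 b1 b2 b3 b4 true b6 b7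
    cases b0 <;> cases b1 <;> cases b2 <;> cases b3 <;> cases b4 <;> cases b5 <;> cases b6 <;> cases b7 <;> rfl
  by_cases h19 : x = "nhl"
  · subst h19
    show pvMrg (some ((6:Int), "nhl")) (pvChain8 b0 b1 b2 b3 b4 b5 b6 b7) = pvChain8 b0 b1 b2 b3 b4 b5 true b7
    cases b0 <;> cases b1 <;> cases b2 <;> cases b3 <;> cases b4 <;> cases b5 <;> cases b6 <;> cases b7 <;> rfl
  by_cases h20 : x = "hockey"
  · subst h20
    show pvMrg (some ((6:Int), "nhl")) (pvChain8 b0 b1 b2 b3 b4 b5 b6 b7) = pvChain8 b0 b1 b2 b3 b4 b5 true b7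
    cases b0 <;> cases b1 <;> cases b2 <;> cases b3 <;> cases b4 <;> cases b5 <;> cases b6 <;> cases b7 <;> rfl
  by_cases h21 : x = "ncaab"
  · subst h21
    show pvMrg (some ((7:Int), "ncaab")) (pvChain8 b0 b1 b2 b3 b4 b5 b6 b7) = pvChain8 b0 b1 b2 b3 b4 b5 b6 true
    cases b0 <;> cases b1 <;> cases b2 <;> cases b3 <;> cases b4 <;> cases b5 <;> cases b6 <;> cases b7 <;> rfl
  by_cases h22 : x = "ncaa-basketball"
  · subst h22
    show pvMrg (some ((7:Int), "ncaab")) (pvChain8 b0 b1 b2 b3 b4 b5 b6 b7) = pvChain8 b0 b1 b2 b3 b4 b5 b6 true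
    cases b0 <;> cases b1 <;> cases b2 <;> cases b3 <;> cases b4 <;> cases b5 <;> cases b6 <;> cases b7 <;> rfl
  by_cases h23 : x = "march-madness"
  · subst h23
    show pvMrg (some ((7:Int), "ncaab")) (pvChain8 b0 b1 b2 b3 b4 b5 b6 b7) = pvChain8 b0 b1 b2 b3 b4 b5 b6 true
    cases b0 <;> cases b1 <;> cases b2 <;> cases b3 <;> cases b4 <;> cases b5 <;> cases b6 <;> cases b7 <;> rfl
  have hf : List.find? (fun (p : String × (Int × String)) => p.1 == x)
      ([("nba", ((0:Int), "nba")),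
       ("basketball", ((0:Int), "nba")),
       ("epl", ((1:Int), "epl")),
       ("premier-league", ((1:Int), "epl")),
       ("premier league", ((1:Int), "epl")),
       ("nfl", ((2:Int), "nfl")),
       ("football", ((2:Int), "nfl")),
       ("soccer", ((3:Int), "soccer")),
       ("mls", ((3:Int), "soccer")),
       ("la-liga", ((3:Int), "soccer")),
       ("serie-a", ((3:Int), "soccer")),
       ("bundesliga", ((3:Int), "soccer")),
       ("ligue-1", ((3:Int), "soccer")),
       ("champions-league", ((3:Int), "soccer")),
       ("mma", ((4:Int), "mma")),
       ("ufc", ((4:Int), "mma")),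
       ("mlb", ((5:Int), "mlb")),
       ("baseball", ((5:Int), "mlb")),
       ("nhl", ((6:Int), "nhl")),
       ("hockey", ((6:Int), "nhl")),
       ("ncaab", ((7:Int), "ncaab")),
       ("ncaa-basketball", ((7:Int), "ncaab")),
       ("march-madness", ((7:Int), "ncaab"))]) = none := by
    rw [List.find?_eq_none]; intro p hp
    fin_cases hp <;> simp [beq_iff_eq, Ne.symm h1, Ne.symm h2, Ne.symm h3, Ne.symm h4, Ne.symm h5, Ne.symm h6, Ne.symm h7, Ne.symm h8, Ne.symm h9, Ne.symm h10, Ne.symm h11, Ne.symm h12, Ne.symm h13, Ne.symm h14, Ne.symm h15, Ne.symm h16, Ne.symm h17, Ne.symm h18, Ne.symm h19, Ne.symm h20, Ne.symm h21, Ne.symm h22, Ne.symm h23]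
  rw [hf]
  simp [pvMrg_none_left, List.contains_eq_mem, h1, h2, h3, h4, h5, h6, h7, h8, h9, h10, h11, h12, h13, h14, h15, h16, h17, h18, h19, h20, h21, h22, h23]

lemma pvM_cons (sts : List String) (t : String) (ts : List String) :
    pvM sts (t :: ts) = (sts.contains (PySem.Str.strip (PySem.Str.lower t)) || pvM sts ts) := by
  simp [pvM]

lemma pvChainC_cons (t : String) (ts : List String) :
    pvChainC (t :: ts) = pvMrg (TAG_TO_PS.get? (PySem.Str.strip (PySem.Str.lower t))) (pvChainC ts) := by
  unfold pvChainC
  simp only [pvM_cons]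
  exact (pvStep_chain _ _ _ _ _ _ _ _ _).symm

lemma pvFold_eq (ts : List String) (acc : Option (Int × String)) :
    ts.foldl pvStepB acc = pvMrg acc (pvChainC ts) := by
  induction ts generalizing acc with
  | nil => simp [pvChainC, pvChain8, pvM, pvMrg_none_right]
  | cons t ts ih =>
      rw [List.foldl_cons, pvStepB_eq, ih, pvMrg_assoc, pvChainC_cons]

lemma findSome?_if_cons (e : String × List String) (l : List (String × List String)) (g : String × List String → Bool) :
    ((e :: l).findSome? (fun e => if g e then some e.1 else none)) =
      if g e then some e.1 else (l.findSome? (fun e => if g e then some e.1 else none)) := by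
  rw [List.findSome?_cons]; split_ifs <;> simp

lemma pvA_swap (sts ts : List String) :
    (sts.any (fun st =>
        (PySem.Set.ofList (ts.map (fun t => PySem.Str.strip (PySem.Str.lower t)))).contains st)) = pvM sts ts := by
  rw [Bool.eq_iff_iff]
  simp only [pvM, List.any_eq_true, List.elem_iff, PySem.Set.contains_iff,
    PySem.Set.mem_ofList, List.mem_map]
  constructor
  · rintro ⟨x, hx, a, ha, rfl⟩; exact ⟨a, ha, hx⟩
  · rintro ⟨x, hx, hm⟩; exact ⟨_, hm, x, hx, rfl⟩

-- ===== VERDICT (by name: the statement is the Claim_ definition above) =====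
theorem parse_sport_from_tags_spec : Claim_equal_parse_sport_from_tags := by
  intro tags _
  unfold Spec_parse_sport_from_tags
  by_cases h : tags = []
  · simp [parse_sport_from_tags, parse_sport_from_tags_alt, h]
  · simp only [parse_sport_from_tags, parse_sport_from_tags_alt, if_neg h, pvFold_eq,
      pvMrg_none_left, SPORT_TAGS]
    simp only [findSome?_if_cons, List.findSome?_nil]
    simp only [pvA_swap]
    unfold pvChainC pvChain8
    split_ifs <;> rfl
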